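-- pv_equiv track=rewrite | github.com/OpenKore/openkore | ai_sidecar/equipment/models.py | calculate_refine_cost
-- ===== SOURCE A (Python) =====
-- def calculate_refine_cost(
--     current_refine: int,
--     target_refine: int,
--     base_cost: int = 2000,
-- ) -> int:
--     """
--     Calculate zeny cost for refining.
--
--     Args:
--         current_refine: Current refine level
--         target_refine: Target refine level
--         base_cost: Base cost per refine attempt
--
--     Returns:
--         Total estimated cost in zeny
--     """
--     if target_refine <= current_refine:
--         return 0
--
--     total_cost = 0
--     for level in range(current_refine + 1, target_refine + 1):
--         # Cost increases exponentially
--         level_cost = base_cost * (2 ** (level // 5))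
--         total_cost += level_cost
--
--     return total_cost
-- ===== SOURCE B (Python) =====
-- def calculate_refine_cost(
--     current_refine: int,
--     target_refine: int,
--     base_cost: int = 2000,
-- ) -> int:
--     # Group the levels current_refine+1 .. target_refine into tiers of 5 that
--     # share the same factor 2**(level // 5); O(#tiers) instead of O(#levels).
--     lo = current_refine + 1
--     hi = target_refine
--     total = 0
--     t = lo // 5
--     while t <= hi // 5:
--         start = lo if lo > 5 * t else 5 * t
--         end = hi if hi < 5 * t + 4 else 5 * t + 4
--         if start <= end:
--             total += (end - start + 1) * base_cost * 2 ** t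
--         t += 1
--     return total
-- ===== Notes on version B (the rewrite author's own statement) =====
-- stated objective: faster
-- what changed: Replaces the per-level loop summing base_cost*2**(level//5) with a loop over the tiers of 5 levels sharing one factor 2**t, adding count*base_cost*2**t per tier (O(#levels/5) iterations instead of O(#levels)).
-- outside the precondition, e.g. on calculate_refine_cost(-5, -2, 2000): A returns 3000.0, B returns 3000.0
import Mathlib
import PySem

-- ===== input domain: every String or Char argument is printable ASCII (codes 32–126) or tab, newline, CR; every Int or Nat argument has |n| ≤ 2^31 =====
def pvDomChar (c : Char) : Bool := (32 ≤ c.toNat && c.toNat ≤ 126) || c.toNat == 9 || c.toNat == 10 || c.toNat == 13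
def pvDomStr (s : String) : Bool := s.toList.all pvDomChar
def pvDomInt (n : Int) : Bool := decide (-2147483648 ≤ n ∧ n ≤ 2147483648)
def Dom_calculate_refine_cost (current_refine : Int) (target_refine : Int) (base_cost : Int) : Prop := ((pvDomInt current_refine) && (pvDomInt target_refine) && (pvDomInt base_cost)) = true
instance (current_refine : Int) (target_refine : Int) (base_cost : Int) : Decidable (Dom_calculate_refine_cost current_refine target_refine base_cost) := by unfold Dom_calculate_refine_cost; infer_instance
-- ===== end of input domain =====

-- ===== PORT A =====
-- B is a tier-grouped closed-form-per-tier rewrite of A's per-level loop; faster by a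
-- constant factor (one term per tier of 5 levels instead of one per level).
-- Exponent note: under Pre_ every level in the range is ≥ 0, so level//5 ≥ 0 and
-- the `.toNat` on the exponent is exact there.
def calculate_refine_cost (current_refine : Int) (target_refine : Int) (base_cost : Int) : Int :=
  if target_refine ≤ current_refine then 0
  else
    (PySem.List.pyRange (current_refine + 1) (target_refine + 1) 1).foldl
      (fun total_cost level => total_cost + base_cost * 2 ^ (PySem.Int.floordiv level 5).toNat) 0

-- ===== PORT B =====
-- the while loop of Source B: one iteration per tier t, fuel = number of remaining tiers
def pvTierLoop (lo hi base : Int) : Nat → Int → Int → Int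
  | 0, _, total => total
  | n + 1, t, total =>
    let start := if lo > 5 * t then lo else 5 * t
    let stop  := if hi < 5 * t + 4 then hi else 5 * t + 4
    let total' := if start ≤ stop then total + (stop - start + 1) * base * 2 ^ t.toNat else total
    pvTierLoop lo hi base n (t + 1) total'

def calculate_refine_cost_alt (current_refine : Int) (target_refine : Int) (base_cost : Int) : Int :=
  let lo := current_refine + 1
  let hi := target_refine
  pvTierLoop lo hi base_cost
    (PySem.Int.floordiv hi 5 - PySem.Int.floordiv lo 5 + 1).toNat
    (PySem.Int.floordiv lo 5) 0

-- ===== PRECONDITION & SPEC =====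
-- Pre_ excludes inputs where the range contains a negative level (target_refine >
-- current_refine and current_refine ≤ -2): there 2**(level//5) has a negative exponent
-- and Python A returns a float, not an int of the declared return type.
def Pre_calculate_refine_cost (current_refine : Int) (target_refine : Int) (base_cost : Int) : Prop :=
  target_refine ≤ current_refine ∨ 0 ≤ current_refine + 1
instance (current_refine : Int) (target_refine : Int) (base_cost : Int) : Decidable (Pre_calculate_refine_cost current_refine target_refine base_cost) := by unfold Pre_calculate_refine_cost; infer_instance

def pvWitness_calculate_refine_cost : Int × Int × Int := (3, 9, 2000)

def Spec_calculate_refine_cost (current_refine : Int) (target_refine : Int) (base_cost : Int) (out : Int) : Prop := out = calculate_refine_cost_alt current_refine target_refine base_cost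
instance (current_refine : Int) (target_refine : Int) (base_cost : Int) (out : Int) : Decidable (Spec_calculate_refine_cost current_refine target_refine base_cost out) := by unfold Spec_calculate_refine_cost; infer_instance

-- ===== CLAIM (what is proved, stated in full; the proofs are below) =====
def Claim_equal_calculate_refine_cost : Prop := ∀ (current_refine : Int) (target_refine : Int) (base_cost : Int), Dom_calculate_refine_cost current_refine target_refine base_cost → Pre_calculate_refine_cost current_refine target_refine base_cost → Spec_calculate_refine_cost current_refine target_refine base_cost (calculate_refine_cost current_refine target_refine base_cost)

-- ===== LEMMAS AND PROOFS =====

theorem pvFd (x : Int) : Int.fdiv x 5 = x / 5 := by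
  rw [Int.fdiv_eq_ediv]; norm_num

-- per-level cost, and the level-by-level sum of n levels starting at lo
def pvF (base level : Int) : Int := base * 2 ^ (PySem.Int.floordiv level 5).toNat

def pvSum (base lo : Int) : Nat → Int
  | 0 => 0
  | n + 1 => pvF base lo + pvSum base (lo + 1) n

theorem pvWitness_ok : Dom_calculate_refine_cost pvWitness_calculate_refine_cost.1 pvWitness_calculate_refine_cost.2.1 pvWitness_calculate_refine_cost.2.2 ∧ Pre_calculate_refine_cost pvWitness_calculate_refine_cost.1 pvWitness_calculate_refine_cost.2.1 pvWitness_calculate_refine_cost.2.2 := by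
  decide

theorem pvSum_split (base lo : Int) (m n : Nat) :
    pvSum base lo (m + n) = pvSum base lo m + pvSum base (lo + m) n := by
  induction m generalizing lo with
  | zero => simp [pvSum]
  | succ k ih =>
    have h1 : k + 1 + n = (k + n) + 1 := by omega
    rw [h1]
    simp only [pvSum, ih (lo + 1)]
    have h2 : lo + 1 + (k : Int) = lo + (k + 1 : Nat) := by push_cast; ring
    rw [h2]
    ring

theorem pvF_tier (base a t : Int) (h1 : 5 * t ≤ a) (h2 : a < 5 * t + 5) :
    pvF base a = base * 2 ^ t.toNat := by
  have h : PySem.Int.floordiv a 5 = t := by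
    simp only [PySem.Int.floordiv, pvFd]
    omega
  rw [pvF, h]

theorem pvSum_tier (base t : Int) :
    ∀ (n : Nat) (a : Int), 5 * t ≤ a → a + n ≤ 5 * t + 5 →
    pvSum base a n = n * (base * 2 ^ t.toNat) := by
  intro n
  induction n with
  | zero => intro a _ _; simp [pvSum]
  | succ k ih =>
    intro a h1 h2
    rw [pvSum, pvF_tier base a t h1 (by omega),
        ih (a + 1) (by omega) (by push_cast at h2; omega)]
    push_cast
    ring

theorem pvFoldl_range (base : Int) :
    ∀ (n : Nat) (lo total : Int),
    (PySem.List.pyRange lo (lo + n) 1).foldl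
      (fun total_cost level => total_cost + base * 2 ^ (PySem.Int.floordiv level 5).toNat) total
      = total + pvSum base lo n := by
  intro n
  induction n with
  | zero => intro lo total; simp [pvSum]
  | succ k ih =>
    intro lo total
    have hcons : PySem.List.pyRange lo (lo + (k + 1 : Nat)) 1
        = lo :: PySem.List.pyRange (lo + 1) (lo + (k + 1 : Nat)) 1 := by
      apply PySem.List.pyRange_one_cons
      push_cast; omega
    have harg : lo + ((k : Int) + 1) = (lo + 1) + (k : Nat) := by push_cast; ring
    rw [hcons]
    simp only [List.foldl_cons]
    push_cast
    rw [harg, ih (lo + 1)]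
    simp only [pvSum, pvF]
    ring

-- when the whole range is empty, every tier contributes nothing
theorem pvTierLoop_empty (lo hi base : Int) (hlt : hi < lo) :
    ∀ (n : Nat) (t total : Int), pvTierLoop lo hi base n t total = total := by
  intro n
  induction n with
  | zero => intro t total; rfl
  | succ k ih =>
    intro t total
    rw [pvTierLoop]
    have h : ¬ ((if lo > 5 * t then lo else 5 * t) ≤ (if hi < 5 * t + 4 then hi else 5 * t + 4)) := by
      split_ifs <;> omega
    rw [if_neg h, ih]

theorem pvTierLoop_sum (lo hi base : Int) (hlo : 0 ≤ lo) (hlohi : lo ≤ hi) :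
    ∀ (n : Nat) (t total : Int), lo / 5 ≤ t → t + n = hi / 5 + 1 →
      pvTierLoop lo hi base n t total
        = total + pvSum base (max lo (5 * t)) (hi + 1 - max lo (5 * t)).toNat := by
  intro n
  induction n with
  | zero =>
    intro t total hlot htn
    have hhi : hi < 5 * t := by omega
    have h0 : (hi + 1 - max lo (5 * t)).toNat = 0 := by omega
    rw [h0]
    simp [pvTierLoop, pvSum]
  | succ k ih =>
    intro t total hlot htn
    have ht0 : 0 ≤ t := by omega
    have hlo5 : lo < 5 * t + 5 := by omega
    have hthi : 5 * t ≤ hi := by omega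
    rw [pvTierLoop]
    have hstart : (if lo > 5 * t then lo else 5 * t) = max lo (5 * t) := by
      split_ifs <;> omega
    have hcond : max lo (5 * t) ≤ (if hi < 5 * t + 4 then hi else 5 * t + 4) := by
      split_ifs <;> omega
    rw [hstart, if_pos hcond, ih (t + 1) _ (by omega) (by omega)]
    have hmax1 : max lo (5 * (t + 1)) = 5 * t + 5 := by omega
    rw [hmax1]
    set a := max lo (5 * t) with ha
    have ha1 : 5 * t ≤ a := le_max_right _ _
    by_cases hcase : hi < 5 * t + 4
    · -- last tier: all remaining levels lie in tier t, the tail sum is empty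
      rw [if_pos hcase]
      have hrem : (hi + 1 - (5 * t + 5)).toNat = 0 := by omega
      rw [hrem]
      have hs : pvSum base a (hi + 1 - a).toNat
          = ((hi + 1 - a).toNat : Int) * (base * 2 ^ t.toNat) :=
        pvSum_tier base t _ a ha1 (by omega)
      have hc : ((hi + 1 - a).toNat : Int) = hi + 1 - a := by omega
      rw [hs, hc]
      simp only [pvSum]
      ring
    · -- full tier: split the level sum at 5*t+5
      rw [if_neg hcase]
      have hsplit : (hi + 1 - a).toNat = (5 * t + 5 - a).toNat + (hi + 1 - (5 * t + 5)).toNat := by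
        omega
      rw [hsplit, pvSum_split]
      have hshift : a + ((5 * t + 5 - a).toNat : Int) = 5 * t + 5 := by omega
      rw [hshift]
      have hs : pvSum base a (5 * t + 5 - a).toNat
          = ((5 * t + 5 - a).toNat : Int) * (base * 2 ^ t.toNat) :=
        pvSum_tier base t _ a ha1 (by omega)
      rw [hs]
      have hc : ((5 * t + 5 - a).toNat : Int) = 5 * t + 5 - a := by omega
      rw [hc]
      ring

-- ===== VERDICT (by name: the statement is the Claim_ definition above) =====
theorem calculate_refine_cost_spec : Claim_equal_calculate_refine_cost := by
  intro cur tgt base _hdom hpre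
  unfold Spec_calculate_refine_cost calculate_refine_cost calculate_refine_cost_alt
  by_cases hle : tgt ≤ cur
  · rw [if_pos hle, pvTierLoop_empty (cur + 1) tgt base (by omega)]
  · rw [if_neg hle]
    have hlo : 0 ≤ cur + 1 := by
      rcases hpre with h | h
      · omega
      · exact h
    have hlohi : cur + 1 ≤ tgt := by omega
    have hn : (tgt + 1) = (cur + 1) + ((tgt - cur).toNat : Nat) := by omega
    rw [hn, pvFoldl_range base (tgt - cur).toNat (cur + 1) 0]
    simp only [PySem.Int.floordiv, pvFd]
    rw [pvTierLoop_sum (cur + 1) tgt base hlo hlohi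
        (tgt / 5 - (cur + 1) / 5 + 1).toNat ((cur + 1) / 5) 0 (le_refl _) (by omega)]
    have hmax : max (cur + 1) (5 * ((cur + 1) / 5)) = cur + 1 := by omega
    rw [hmax]
    have hc : (tgt + 1 - (cur + 1)).toNat = (tgt - cur).toNat := by omega
    rw [hc]
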